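-- pv_equiv track=rewrite | github.com/3lc-ai/3lc-ultralytics | src/tlc_ultralytics/engine/dataset.py | _encode_example_ids
-- ===== SOURCE A (Python) =====
-- def _encode_example_ids(example_ids: list[int]) -> list[dict[str, int]]:
--     """Encode a list of example IDs into ranges for efficient storage.
--
--     :param example_ids: List of example IDs (assumed to be sorted)
--     :return: List of range dictionaries with 'start' and 'end' keys
--     """
--     if not example_ids:
--         return []
--
--     ranges = []
--     start = example_ids[0]
--     end = start
--
--     for i in range(1, len(example_ids)):
--         if example_ids[i] == end + 1:
--             # Consecutive, extend current range
--             end = example_ids[i]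
--         else:
--             # Gap found, save current range and start new one
--             ranges.append({"start": start, "end": end})
--             start = example_ids[i]
--             end = start
--
--     # Don't forget the last range
--     ranges.append({"start": start, "end": end})
--
--     return ranges
-- ===== SOURCE B (Python) =====
-- def _encode_example_ids(example_ids):
--     """Staged: first compute all break indices (where consecutiveness fails),
--     then pair consecutive boundaries into ranges."""
--     n = len(example_ids)
--     breaks = [i for i in range(1, n) if example_ids[i] != example_ids[i - 1] + 1]
--     bounds = [0] + breaks + [n] if n else []
--     return [{"start": example_ids[b], "end": example_ids[e - 1]}
--             for b, e in zip(bounds, bounds[1:])]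
-- ===== Notes on version B (the rewrite author's own statement) =====
-- stated objective: alternative
-- what changed: Replaces A's single pass carrying start/end accumulator state with a staged computation: a comprehension collects the break indices where consecutiveness fails, and a second pass zips successive boundaries into ranges.
import Mathlib
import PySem

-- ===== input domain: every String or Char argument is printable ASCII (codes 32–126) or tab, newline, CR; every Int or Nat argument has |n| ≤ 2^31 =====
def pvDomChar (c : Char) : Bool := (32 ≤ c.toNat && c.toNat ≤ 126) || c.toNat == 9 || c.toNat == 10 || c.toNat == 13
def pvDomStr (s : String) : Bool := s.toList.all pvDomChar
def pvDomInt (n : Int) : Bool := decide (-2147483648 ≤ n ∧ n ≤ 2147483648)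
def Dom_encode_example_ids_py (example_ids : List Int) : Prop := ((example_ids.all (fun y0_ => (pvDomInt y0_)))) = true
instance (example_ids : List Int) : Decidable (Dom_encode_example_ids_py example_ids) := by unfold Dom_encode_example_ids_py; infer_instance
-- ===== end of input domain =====

-- B is a staged decomposition (break-index list + boundary zipping) instead of A's stateful single pass; return values proved equal on all inputs.

-- ===== PORT A =====
-- A's loop over range(1, len) with state (ranges, start, end); loop indices are nonnegative
-- and in range, so PySem.List.pyGetD with default 0 is exact (default never used).
def encode_example_ids_py (example_ids : List Int) : List (List (String × Int)) :=
  if example_ids = [] then []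
  else
    let start := PySem.List.pyGetD example_ids 0 0
    let st := (PySem.List.pyRange 1 (example_ids.length : Int) 1).foldl
      (fun (acc : List (List (String × Int)) × Int × Int) i =>
        let x := PySem.List.pyGetD example_ids i 0
        if x = acc.2.2 + 1 then (acc.1, acc.2.1, x)
        else (acc.1 ++ [[("start", acc.2.1), ("end", acc.2.2)]], x, x))
      ([], start, start)
    st.1 ++ [[("start", st.2.1), ("end", st.2.2)]]

-- ===== PORT B =====
-- Source B step by step: breaks (a filtered range comprehension), bounds, then zip + map.
-- All indices used are nonnegative and in range, so pyGetD with default 0 is exact.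
def encode_example_ids_py_alt (example_ids : List Int) : List (List (String × Int)) :=
  let n : Int := (example_ids.length : Int)
  let breaks := (PySem.List.pyRange 1 n 1).filter
    (fun i => PySem.List.pyGetD example_ids i 0 ≠ PySem.List.pyGetD example_ids (i - 1) 0 + 1)
  let bounds := if n ≠ 0 then 0 :: (breaks ++ [n]) else []
  (bounds.zip bounds.tail).map
    (fun be => [("start", PySem.List.pyGetD example_ids be.1 0),
                ("end", PySem.List.pyGetD example_ids (be.2 - 1) 0)])

-- ===== PRECONDITION & SPEC =====
def Spec_encode_example_ids_py (example_ids : List Int) (out : List (List (String × Int))) : Prop := out = encode_example_ids_py_alt example_ids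
instance (example_ids : List Int) (out : List (List (String × Int))) : Decidable (Spec_encode_example_ids_py example_ids out) := by unfold Spec_encode_example_ids_py; infer_instance

-- ===== CLAIM (what is proved, stated in full; the proofs are below) =====
def Claim_equal_encode_example_ids_py : Prop := ∀ (example_ids : List Int), Dom_encode_example_ids_py example_ids → Spec_encode_example_ids_py example_ids (encode_example_ids_py example_ids)

-- ===== LEMMAS AND PROOFS =====

-- A's loop body, named for the invariant lemma.
def pvStepA (ids : List Int) (acc : List (List (String × Int)) × Int × Int) (i : Int) :
    List (List (String × Int)) × Int × Int :=
  let x := PySem.List.pyGetD ids i 0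
  if x = acc.2.2 + 1 then (acc.1, acc.2.1, x)
  else (acc.1 ++ [[("start", acc.2.1), ("end", acc.2.2)]], x, x)

-- B's break predicate, named.
def pvBrk (ids : List Int) (i : Int) : Bool :=
  PySem.List.pyGetD ids i 0 ≠ PySem.List.pyGetD ids (i - 1) 0 + 1

-- Ranges generated from a start value and a list of cut points.
def pvMkR (ids : List Int) (s : Int) : List Int → List (List (String × Int))
  | [] => []
  | c :: cs => [("start", s), ("end", PySem.List.pyGetD ids (c - 1) 0)] :: pvMkR ids (PySem.List.pyGetD ids c 0) cs

-- B's zip-of-bounds equals pvMkR over the tail of the bounds list.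
theorem pv_zip_eq_mkR (ids : List Int) : ∀ (rest : List Int) (b : Int),
    (((b :: rest).zip rest).map
      (fun be => [("start", PySem.List.pyGetD ids be.1 0),
                  ("end", PySem.List.pyGetD ids (be.2 - 1) 0)]))
    = pvMkR ids (PySem.List.pyGetD ids b 0) rest := by
  intro rest
  induction rest with
  | nil => intro b; simp [pvMkR]
  | cons c cs ih => intro b; simp [pvMkR, ih c]

-- Invariant: A's remaining fold from index p+1, with 'end' = ids[p] and pending start s,
-- flushes to rs followed by the ranges cut at B's remaining break indices.
theorem pv_main (ids : List Int) :
    ∀ k p (rs : List (List (String × Int))) (s : Int), ids.length - (p + 1) = k → p + 1 ≤ ids.length →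
    (let st := (PySem.List.pyRange ((p : Int) + 1) (ids.length : Int) 1).foldl (pvStepA ids) (rs, s, PySem.List.pyGetD ids (p : Int) 0)
     st.1 ++ [[("start", st.2.1), ("end", st.2.2)]])
    = rs ++ pvMkR ids s (((PySem.List.pyRange ((p : Int) + 1) (ids.length : Int) 1).filter (pvBrk ids)) ++ [(ids.length : Int)]) := by
  intro k
  induction k with
  | zero =>
    intro p rs s hk hp
    have hpe : p + 1 = ids.length := by omega
    rw [PySem.List.pyRange_one_eq_nil (by exact_mod_cast hpe.ge)]
    have : ((ids.length : Int) - 1) = (p : Int) := by omega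
    simp [pvMkR, this]
  | succ k ih =>
    intro p rs s hk hp
    have hlt : p + 1 < ids.length := by omega
    rw [PySem.List.pyRange_one_cons (by exact_mod_cast hlt)]
    simp only [List.foldl_cons, List.filter_cons]
    have hsub : ((p : Int) + 1 - 1) = (p : Int) := by ring
    by_cases hc : PySem.List.pyGetD ids ((p : Int) + 1) 0 = PySem.List.pyGetD ids (p : Int) 0 + 1
    · -- consecutive: A extends the run; B records no break at p+1
      have hstep : pvStepA ids (rs, s, PySem.List.pyGetD ids (p : Int) 0) ((p : Int) + 1)
          = (rs, s, PySem.List.pyGetD ids ((p : Int) + 1) 0) := by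
        simp only [pvStepA]; rw [if_pos hc]
      have hb : pvBrk ids ((p : Int) + 1) = false := by
        simp only [pvBrk, hsub]; simp only [hc]; simp
      rw [hstep, hb]
      have := ih (p + 1) rs s (by omega) (by omega)
      simp only [Nat.cast_add, Nat.cast_one] at this
      simpa using this
    · -- gap: A flushes the pending range; B records a break at p+1
      have hstep : pvStepA ids (rs, s, PySem.List.pyGetD ids (p : Int) 0) ((p : Int) + 1)
          = (rs ++ [[("start", s), ("end", PySem.List.pyGetD ids (p : Int) 0)]],
             PySem.List.pyGetD ids ((p : Int) + 1) 0, PySem.List.pyGetD ids ((p : Int) + 1) 0) := by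
        simp only [pvStepA]; rw [if_neg hc]
      have hb : pvBrk ids ((p : Int) + 1) = true := by
        simp only [pvBrk, hsub]; exact decide_eq_true hc
      rw [hstep, hb]
      have := ih (p + 1) (rs ++ [[("start", s), ("end", PySem.List.pyGetD ids (p : Int) 0)]])
        (PySem.List.pyGetD ids ((p : Int) + 1) 0) (by omega) (by omega)
      simp only [Nat.cast_add, Nat.cast_one] at this
      simp only [if_true]
      rw [List.append_assoc] at this
      simpa [pvMkR, hsub] using this

-- ===== VERDICT (by name: the statement is the Claim_ definition above) =====
theorem encode_example_ids_py_spec : Claim_equal_encode_example_ids_py := by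
  intro ids _
  show encode_example_ids_py ids = encode_example_ids_py_alt ids
  by_cases hnil : ids = []
  · subst hnil
    simp [encode_example_ids_py, encode_example_ids_py_alt]
  · have hlen : 1 ≤ ids.length := by
      cases ids with
      | nil => exact absurd rfl hnil
      | cons a t => simp
    have hne : (ids.length : Int) ≠ 0 := by
      intro h; exact absurd (by exact_mod_cast h) (by omega : ids.length ≠ 0)
    have hmain := pv_main ids (ids.length - 1) 0 [] (PySem.List.pyGetD ids 0 0) (by omega) (by omega)
    simp only [Nat.cast_zero, zero_add] at hmain
    rw [encode_example_ids_py, if_neg hnil, encode_example_ids_py_alt]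
    simp only []
    rw [if_pos hne, List.tail_cons, pv_zip_eq_mkR ids _ 0]
    exact hmain
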